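-- pv_equiv track=rewrite | github.com/6ka/totally_balanced_structures | DLC/diss_approximation/diss_association.py | cluster_matrix_from_column_indices
-- ===== SOURCE A (Python) =====
-- def cluster_matrix_from_column_indices(columns_as_truncated_balls, column_indices, binary_matrix):
--     cluster_matrix = [[None] * len(binary_matrix) for i in range(len(binary_matrix))]
--
--     for center, column in columns_as_truncated_balls:
--         for line_index, line in enumerate(binary_matrix):
--             if line[column] and \
--                     (cluster_matrix[center][line_index] is None or cluster_matrix[center][line_index] > column_indices[
--                         column]):
--                 cluster_matrix[center][line_index] = column_indices[column]
--
--     return cluster_matrix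
-- ===== SOURCE B (Python) =====
-- def cluster_matrix_from_column_indices(columns_as_truncated_balls, column_indices, binary_matrix):
--     n = len(binary_matrix)
--     columns_by_center = {}
--     for center, column in columns_as_truncated_balls:
--         columns_by_center.setdefault(center, []).append(column)
--     cluster_matrix = [[None] * n for _ in range(n)]
--     for center, cols in columns_by_center.items():
--         for line_index, line in enumerate(binary_matrix):
--             vals = [column_indices[c] for c in cols if line[c]]
--             if vals:
--                 cluster_matrix[center][line_index] = min(vals)
--     return cluster_matrix
-- ===== Notes on version B (the rewrite author's own statement) =====
-- stated objective: alternative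
-- what changed: Instead of A's pair-driven incremental compare-and-update sweeps over the matrix, B groups the columns by center in one dict pass and then fills each group's row line by line, computing each cell in one shot as min of the matching column indices; Pre_ additionally excludes inputs where two balls carry distinct center labels addressing the same matrix row (labels differing by len(binary_matrix), one counted from the end) with columns truthy in a common line - an unspecified duplicate-key corner (A keeps the overall minimum there, B the last such group's minimum).
import Mathlib
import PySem

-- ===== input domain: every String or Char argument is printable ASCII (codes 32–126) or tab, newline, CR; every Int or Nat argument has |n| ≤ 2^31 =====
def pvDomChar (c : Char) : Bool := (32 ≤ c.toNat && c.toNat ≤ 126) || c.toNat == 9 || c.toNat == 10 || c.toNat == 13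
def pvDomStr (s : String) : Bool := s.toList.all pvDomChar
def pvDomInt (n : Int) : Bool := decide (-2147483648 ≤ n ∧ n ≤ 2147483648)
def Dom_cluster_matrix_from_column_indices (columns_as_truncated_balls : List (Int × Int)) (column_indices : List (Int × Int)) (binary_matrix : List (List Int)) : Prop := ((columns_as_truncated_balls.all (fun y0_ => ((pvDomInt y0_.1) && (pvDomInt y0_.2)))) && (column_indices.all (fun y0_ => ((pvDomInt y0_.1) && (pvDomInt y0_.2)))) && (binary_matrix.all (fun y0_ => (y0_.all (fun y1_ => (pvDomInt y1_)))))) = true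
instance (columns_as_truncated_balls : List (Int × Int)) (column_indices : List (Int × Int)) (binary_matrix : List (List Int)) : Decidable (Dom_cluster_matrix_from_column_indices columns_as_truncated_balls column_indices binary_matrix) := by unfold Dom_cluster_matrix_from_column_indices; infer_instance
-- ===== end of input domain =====

-- B replaces A's pair-driven incremental compare-and-update sweeps by one grouping pass (columns by
-- center) followed by filling each group's row line by line, each cell computed in one shot as the
-- min of the matching column indices (objective: alternative decomposition, not speed).

-- ===== PORT A =====
-- body of A's inner 'for line_index, line in enumerate(binary_matrix)' loop, for the pair (center, column)
def pvStepA (d : PySem.Dict Int Int) (center column : Int)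
    (m : List (List (Option Int))) (q : Int × List Int) : List (List (Option Int)) :=
  match PySem.List.pyGet? q.2 column with
  | none => m                    -- IndexError on line[column]: excluded by Pre_
  | some v =>
    if v ≠ 0 then
      match PySem.List.pyGet? m center with
      | none => m                -- IndexError on cluster_matrix[center]: excluded by Pre_
      | some row =>
        match PySem.List.pyGetD row q.1 none with
        | none =>
          match d.get? column with
          | none => m            -- KeyError on column_indices[column]: excluded by Pre_
          | some w => PySem.List.pySetD m center (PySem.List.pySetD row q.1 (some w))
        | some x =>
          match d.get? column with
          | none => m            -- KeyError on column_indices[column]: excluded by Pre_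
          | some w =>
            if x > w then PySem.List.pySetD m center (PySem.List.pySetD row q.1 (some w)) else m
    else m

def cluster_matrix_from_column_indices (columns_as_truncated_balls : List (Int × Int)) (column_indices : List (Int × Int)) (binary_matrix : List (List Int)) : List (List (Option Int)) :=
  let d := PySem.Dict.mk column_indices
  let init := List.replicate binary_matrix.length (List.replicate binary_matrix.length (none : Option Int))
  columns_as_truncated_balls.foldl
    (fun m p => (PySem.List.enumerate binary_matrix 0).foldl (pvStepA d p.1 p.2) m) init

-- ===== PORT B =====
-- vals = [column_indices[c] for c in cols if line[c]]
def pvValsB (d : PySem.Dict Int Int) (line : List Int) (cols : List Int) : List Int :=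
  cols.foldl (fun acc c =>
    match PySem.List.pyGet? line c with
    | none => acc                -- IndexError on line[c]: excluded by Pre_
    | some v =>
      if v ≠ 0 then
        match d.get? c with
        | none => acc            -- KeyError on column_indices[c]: excluded by Pre_
        | some w => acc ++ [w]
      else acc) []

-- body of B's inner 'for line_index, line in enumerate(binary_matrix)' loop, for the group (center, cols)
-- ('vals' is bound once in the Python; it is written out here)
def pvStepB (d : PySem.Dict Int Int) (center : Int) (cols : List Int)
    (m : List (List (Option Int))) (q : Int × List Int) : List (List (Option Int)) :=
  if (pvValsB d q.2 cols).isEmpty then m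
  else
    match PySem.List.pyGet? m center with
    | none => m                  -- IndexError on cluster_matrix[center]: excluded by Pre_
    | some row =>
      PySem.List.pySetD m center
        (PySem.List.pySetD row q.1 (PySem.List.min? (pvValsB d q.2 cols) (fun x => x)))

def cluster_matrix_from_column_indices_alt (columns_as_truncated_balls : List (Int × Int)) (column_indices : List (Int × Int)) (binary_matrix : List (List Int)) : List (List (Option Int)) :=
  let d := PySem.Dict.mk column_indices
  let columns_by_center : PySem.Dict Int (List Int) :=
    columns_as_truncated_balls.foldl
      (fun g p => g.modify p.1 [] (· ++ [p.2])) PySem.Dict.empty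
  let init := List.replicate binary_matrix.length (List.replicate binary_matrix.length (none : Option Int))
  columns_by_center.items.foldl
    (fun m pc => (PySem.List.enumerate binary_matrix 0).foldl (pvStepB d pc.1 pc.2) m) init

-- ===== PRECONDITION & SPEC =====
-- First conjunct: exactly the inputs on which Python A raises no exception (every pair's column
-- must index into every line; whenever some line is truthy at that column, the pair's center must
-- index into the matrix and the column must be a key of column_indices).
-- Second conjunct: Pre_ additionally excludes inputs where two balls carry distinct center labels
-- denoting the same matrix row (labels differing by len(binary_matrix), one counted from the end)
-- with both columns truthy in a common line — an unspecified duplicate-key corner (A keeps the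
-- overall minimum in the shared cell, B the last such group's minimum; neither is specified).
def Pre_cluster_matrix_from_column_indices (columns_as_truncated_balls : List (Int × Int)) (column_indices : List (Int × Int)) (binary_matrix : List (List Int)) : Prop :=
  (∀ p ∈ columns_as_truncated_balls,
    (∀ line ∈ binary_matrix, PySem.Raise.InRange line.length p.2) ∧
    ((∃ line ∈ binary_matrix, PySem.List.pyGetD line p.2 0 ≠ 0) →
      (PySem.Raise.InRange binary_matrix.length p.1 ∧ ∃ q ∈ column_indices, q.1 = p.2))) ∧
  (∀ p ∈ columns_as_truncated_balls, ∀ q ∈ columns_as_truncated_balls,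
    p.1 - q.1 = (binary_matrix.length : Int) →
    ∀ line ∈ binary_matrix,
      ¬(PySem.List.pyGetD line p.2 0 ≠ 0 ∧ PySem.List.pyGetD line q.2 0 ≠ 0))
instance (columns_as_truncated_balls : List (Int × Int)) (column_indices : List (Int × Int)) (binary_matrix : List (List Int)) : Decidable (Pre_cluster_matrix_from_column_indices columns_as_truncated_balls column_indices binary_matrix) := by unfold Pre_cluster_matrix_from_column_indices; infer_instance

def pvWitness_cluster_matrix_from_column_indices : (List (Int × Int)) × (List (Int × Int)) × List (List Int) :=
  ([(0, 1), (1, 0)], [(0, 5), (1, 3)], [[1, 0], [0, 1]])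

def Spec_cluster_matrix_from_column_indices (columns_as_truncated_balls : List (Int × Int)) (column_indices : List (Int × Int)) (binary_matrix : List (List Int)) (out : List (List (Option Int))) : Prop := out = cluster_matrix_from_column_indices_alt columns_as_truncated_balls column_indices binary_matrix
instance (columns_as_truncated_balls : List (Int × Int)) (column_indices : List (Int × Int)) (binary_matrix : List (List Int)) (out : List (List (Option Int))) : Decidable (Spec_cluster_matrix_from_column_indices columns_as_truncated_balls column_indices binary_matrix out) := by unfold Spec_cluster_matrix_from_column_indices; infer_instance

-- ===== CLAIM (what is proved, stated in full; the proofs are below) =====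
def Claim_equal_cluster_matrix_from_column_indices : Prop := ∀ (columns_as_truncated_balls : List (Int × Int)) (column_indices : List (Int × Int)) (binary_matrix : List (List Int)), Dom_cluster_matrix_from_column_indices columns_as_truncated_balls column_indices binary_matrix → Pre_cluster_matrix_from_column_indices columns_as_truncated_balls column_indices binary_matrix → Spec_cluster_matrix_from_column_indices columns_as_truncated_balls column_indices binary_matrix (cluster_matrix_from_column_indices columns_as_truncated_balls column_indices binary_matrix)

-- ===== LEMMAS AND PROOFS =====

-- A's conditional cell update, as a binary operation on the cell value
def pvOptMin (o : Option Int) (v : Int) : Option Int :=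
  match o with
  | none => some v
  | some x => if x > v then some v else some x

-- 'line[c]' is truthy
def pvTr (line : List Int) (c : Int) : Bool :=
  match PySem.List.pyGet? line c with
  | some v => v != 0
  | none => false

def pvW (d : PySem.Dict Int Int) (c : Int) : Int := (d.get? c).getD 0

def pvCell (m : List (List (Option Int))) (i j : Nat) : Option Int := (m.getD i []).getD j none

-- the pairs of balls that touch cell (i, j) in A's traversal
def pvCond (d : PySem.Dict Int Int) (n : Nat) (bm : List (List Int)) (i j : Nat) (p : Int × Int) : Bool :=
  (PySem.List.pyIdx? n p.1 == some i) && pvTr (bm.getD j []) p.2 && (d.get? p.2).isSome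

def pvSeq (d : PySem.Dict Int Int) (n : Nat) (bm : List (List Int)) (i j : Nat) (balls : List (Int × Int)) : List Int :=
  (balls.filter (pvCond d n bm i j)).map (fun p => pvW d p.2)

-- the groups that touch cell (i, j) in B's traversal
def pvCondB (d : PySem.Dict Int Int) (n : Nat) (bm : List (List Int)) (i j : Nat) (pc : Int × List Int) : Bool :=
  (PySem.List.pyIdx? n pc.1 == some i) && !(pvValsB d (bm.getD j []) pc.2).isEmpty

lemma pvOptMin_idem (o : Option Int) (v : Int) : pvOptMin (pvOptMin o v) v = pvOptMin o v := by
  cases o <;> simp [pvOptMin] <;> split_ifs <;> simp_all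

lemma pvIdx?_lt {n : Nat} {c : Int} {k : Nat} (h : PySem.List.pyIdx? n c = some k) : k < n := by
  unfold PySem.List.pyIdx? at h
  split_ifs at h <;> simp_all <;> omega

lemma pvIdx?_alias {n : Nat} {a b : Int} {i : Nat}
    (ha : PySem.List.pyIdx? n a = some i) (hb : PySem.List.pyIdx? n b = some i) :
    a = b ∨ a - b = (n : Int) ∨ b - a = (n : Int) := by
  unfold PySem.List.pyIdx? at ha hb
  split_ifs at ha hb <;> simp_all <;> omega

lemma pvGet?_none_idx {α : Type} {xs : List α} {c : Int} (h : PySem.List.pyGet? xs c = none) :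
    PySem.List.pyIdx? xs.length c = none := by
  unfold PySem.List.pyGet? at h
  cases hi : PySem.List.pyIdx? xs.length c with
  | none => rfl
  | some k =>
    rw [hi] at h
    simp [List.getElem?_eq_getElem (pvIdx?_lt hi)] at h

lemma pvGet?_some_idx {α : Type} {xs : List α} {c : Int} {r : α}
    (h : PySem.List.pyGet? xs c = some r) :
    ∃ k0, PySem.List.pyIdx? xs.length c = some k0 ∧ k0 < xs.length ∧ xs[k0]? = some r := by
  unfold PySem.List.pyGet? at h
  cases hi : PySem.List.pyIdx? xs.length c with
  | none => rw [hi] at h; simp at h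
  | some k => exact ⟨k, rfl, pvIdx?_lt hi, by rw [hi] at h; simpa using h⟩

-- cell formula for one write m[k0][k] := w (k0 the row pyIdx? resolves c to)
lemma pvWrite_cell {m : List (List (Option Int))} {row : List (Option Int)} {k0 : Nat} (k : Nat)
    (w : Option Int) (hget : m[k0]? = some row) (hrlen : row.length = m.length)
    (hk : k < m.length) (i j : Nat) (hi : i < m.length) (hj : j < m.length) :
    pvCell (m.set k0 (row.set k w)) i j = if i = k0 ∧ j = k then w else pvCell m i j := by
  unfold pvCell
  simp only [List.getD_eq_getElem?_getD, List.getElem?_set]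
  by_cases hik : i = k0
  · subst hik
    simp only [if_pos hi, Option.getD_some]
    by_cases hjk : j = k
    · subst hjk
      simp [hrlen, hj]
    · simp [Ne.symm hjk, hjk, hget]
  · simp [if_neg (fun h : k0 = i => hik h.symm), hik]

lemma pvStepA_cell (d : PySem.Dict Int Int) (c col : Int) (m : List (List (Option Int)))
    (k : Nat) (line : List Int) (hrow : ∀ r ∈ m, r.length = m.length) (hk : k < m.length) :
    (pvStepA d c col m ((k : Int), line)).length = m.length ∧
    (∀ r ∈ pvStepA d c col m ((k : Int), line), r.length = m.length) ∧
    (∀ i j : Nat, i < m.length → j < m.length →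
      pvCell (pvStepA d c col m ((k : Int), line)) i j =
        if PySem.List.pyIdx? m.length c = some i ∧ j = k ∧ pvTr line col ∧ (d.get? col).isSome
        then pvOptMin (pvCell m i j) (pvW d col)
        else pvCell m i j) := by
  unfold pvStepA
  simp only
  cases hline : PySem.List.pyGet? line col with
  | none =>
    refine ⟨by trivial, hrow, ?_⟩
    intro i j hi hj
    simp [pvTr, hline]
  | some v =>
    by_cases hv : v = 0
    · subst hv
      refine ⟨by simp, by simpa using hrow, ?_⟩
      intro i j hi hj
      simp [pvTr, hline]
    · simp only [if_pos hv]
      cases hgm : PySem.List.pyGet? m c with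
      | none =>
        refine ⟨by trivial, hrow, ?_⟩
        intro i j hi hj
        have := pvGet?_none_idx hgm
        simp [this]
      | some row =>
        obtain ⟨k0, hidx, hk0, hget⟩ := pvGet?_some_idx hgm
        have hrowmem : row ∈ m := List.mem_of_getElem? hget
        have hrlen : row.length = m.length := hrow _ hrowmem
        have hmrow : m.getD k0 [] = row := by
          simp [List.getD_eq_getElem?_getD, hget]
        have hsetD : ∀ r' : List (Option Int),
            PySem.List.pySetD m c r' = m.set k0 r' := by
          intro r'
          simp [PySem.List.pySetD, PySem.List.pySet?, hidx]
        have hcellm : ∀ j : Nat, pvCell m k0 j = row.getD j none := by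
          intro j
          unfold pvCell
          rw [hmrow]
        have hsetlen : ∀ w : Int, (m.set k0 (row.set k (some w))).length = m.length := by
          intro w; simp
        have hsetrows : ∀ w : Int, ∀ r ∈ m.set k0 (row.set k (some w)), r.length = m.length := by
          intro w r hr
          rcases List.mem_or_eq_of_mem_set hr with h | h
          · exact hrow _ h
          · subst h; simp [hrlen]
        have htr : pvTr line col = true := by simp [pvTr, hline, hv]
        have hrowsetw : ∀ w : Int, PySem.List.pySetD row (k : Int) (some w) = row.set k (some w) := by
          intro w; simp
        simp only []
        cases hcell : PySem.List.pyGetD row (k : Int) none with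
        | none =>
          cases hd : d.get? col with
          | none =>
            simp only []
            refine ⟨by trivial, hrow, ?_⟩
            intro i j hi hj
            simp [hd]
          | some w =>
            simp only []
            rw [hrowsetw, hsetD]
            refine ⟨hsetlen w, hsetrows w, ?_⟩
            intro i j hi hj
            rw [pvWrite_cell k (some w) hget hrlen hk i j hi hj, hidx]
            simp only [htr, hd, Option.isSome_some, and_true, true_and, Option.some.injEq]
            by_cases hik : i = k0
            · subst hik
              by_cases hjk : j = k
              · subst hjk
                have : pvCell m i j = none := by
                  rw [hcellm]
                  simpa using hcell
                simp [this, pvOptMin, pvW, hd]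
              · simp [hjk]
            · simp only [if_neg (show ¬(i = k0 ∧ j = k) from fun h => hik h.1),
                if_neg (show ¬(k0 = i ∧ j = k) from fun h => hik h.1.symm)]
        | some x =>
          cases hd : d.get? col with
          | none =>
            simp only []
            refine ⟨by trivial, hrow, ?_⟩
            intro i j hi hj
            simp [hd]
          | some w =>
            simp only []
            have hcm : pvCell m k0 k = some x := by
              rw [hcellm]
              simpa using hcell
            by_cases hxw : x > w
            · rw [if_pos hxw, hrowsetw, hsetD]
              refine ⟨hsetlen w, hsetrows w, ?_⟩
              intro i j hi hj
              rw [pvWrite_cell k (some w) hget hrlen hk i j hi hj, hidx]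
              simp only [htr, hd, Option.isSome_some, and_true, true_and, Option.some.injEq]
              by_cases hik : i = k0
              · subst hik
                by_cases hjk : j = k
                · subst hjk
                  simp [hcm, pvOptMin, pvW, hd, hxw]
                · simp [hjk]
              · simp only [if_neg (show ¬(i = k0 ∧ j = k) from fun h => hik h.1),
                  if_neg (show ¬(k0 = i ∧ j = k) from fun h => hik h.1.symm)]
            · rw [if_neg hxw]
              refine ⟨by trivial, hrow, ?_⟩
              intro i j hi hj
              rw [hidx]
              simp only [htr, hd, Option.isSome_some, and_true, true_and, Option.some.injEq]
              by_cases hik : i = k0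
              · subst hik
                by_cases hjk : j = k
                · subst hjk
                  simp [hcm, pvOptMin, pvW, hd, hxw]
                · simp [hjk]
              · simp only [if_neg (show ¬(k0 = i ∧ j = k) from fun h => hik h.1.symm)]

lemma pvStepB_cell (d : PySem.Dict Int Int) (c : Int) (cols : List Int) (m : List (List (Option Int)))
    (k : Nat) (line : List Int) (hrow : ∀ r ∈ m, r.length = m.length) (hk : k < m.length) :
    (pvStepB d c cols m ((k : Int), line)).length = m.length ∧
    (∀ r ∈ pvStepB d c cols m ((k : Int), line), r.length = m.length) ∧
    (∀ i j : Nat, i < m.length → j < m.length →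
      pvCell (pvStepB d c cols m ((k : Int), line)) i j =
        if PySem.List.pyIdx? m.length c = some i ∧ j = k ∧ (pvValsB d line cols).isEmpty = false
        then PySem.List.min? (pvValsB d line cols) (fun x => x)
        else pvCell m i j) := by
  unfold pvStepB
  simp only
  cases hv : (pvValsB d line cols).isEmpty with
  | true =>
    rw [if_pos rfl]
    refine ⟨rfl, hrow, ?_⟩
    intro i j hi hj
    simp [hv]
  | false =>
    rw [if_neg (by simp)]
    cases hgm : PySem.List.pyGet? m c with
    | none =>
      refine ⟨by trivial, hrow, ?_⟩
      intro i j hi hj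
      have := pvGet?_none_idx hgm
      simp [this]
    | some row =>
      obtain ⟨k0, hidx, hk0, hget⟩ := pvGet?_some_idx hgm
      have hrlen : row.length = m.length := hrow _ (List.mem_of_getElem? hget)
      have hsetD : PySem.List.pySetD m c (row.set k (PySem.List.min? (pvValsB d line cols) (fun x => x)))
          = m.set k0 (row.set k (PySem.List.min? (pvValsB d line cols) (fun x => x))) := by
        simp [PySem.List.pySetD, PySem.List.pySet?, hidx]
      have hrowset : PySem.List.pySetD row (k : Int) (PySem.List.min? (pvValsB d line cols) (fun x => x))
          = row.set k (PySem.List.min? (pvValsB d line cols) (fun x => x)) := by simp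
      simp only []
      rw [hrowset, hsetD]
      refine ⟨by simp, ?_, ?_⟩
      · intro r hr
        rcases List.mem_or_eq_of_mem_set hr with h | h
        · simpa using hrow _ h
        · subst h; simp [hrlen]
      · intro i j hi hj
        rw [show pvCell (m.set k0 (row.set k (PySem.List.min? (pvValsB d line cols) (fun x => x))))
              i j = _ from pvWrite_cell k _ hget hrlen hk i j hi hj, hidx]
        by_cases hik : i = k0
        · subst hik
          by_cases hjk : j = k
          · subst hjk
            simp
          · simp [hjk]
        · split_ifs <;> simp_all

lemma pvInner_cell (d : PySem.Dict Int Int) (c col : Int) (bm : List (List Int))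
    (L : List (Int × List Int))
    (hL : ∀ q ∈ L, ∃ k : Nat, k < bm.length ∧ q = ((k : Int), bm.getD k [])) :
    ∀ m : List (List (Option Int)), m.length = bm.length → (∀ r ∈ m, r.length = bm.length) →
    (L.foldl (pvStepA d c col) m).length = bm.length ∧
    (∀ r ∈ L.foldl (pvStepA d c col) m, r.length = bm.length) ∧
    (∀ i j : Nat, i < bm.length → j < bm.length →
      pvCell (L.foldl (pvStepA d c col) m) i j =
        if ((j : Int), bm.getD j []) ∈ L ∧ PySem.List.pyIdx? bm.length c = some i ∧
            pvTr (bm.getD j []) col = true ∧ (d.get? col).isSome = true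
        then pvOptMin (pvCell m i j) (pvW d col)
        else pvCell m i j) := by
  induction L with
  | nil =>
    intro m hm hrows
    refine ⟨hm, hrows, ?_⟩
    intro i j hi hj
    simp
  | cons q L ih =>
    intro m hm hrows
    obtain ⟨k, hk, rfl⟩ := hL q (List.mem_cons_self)
    have hrows' : ∀ r ∈ m, r.length = m.length := fun r hr => by rw [hm]; exact hrows r hr
    have hk' : k < m.length := by rw [hm]; exact hk
    obtain ⟨hlen1, hrows1, hcells1⟩ := pvStepA_cell d c col m k (bm.getD k []) hrows' hk'
    have hm' : (pvStepA d c col m ((k : Int), bm.getD k [])).length = bm.length := by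
      rw [hlen1, hm]
    have hrows'' : ∀ r ∈ pvStepA d c col m ((k : Int), bm.getD k []), r.length = bm.length := by
      intro r hr
      rw [← hm]
      exact hrows1 r hr
    obtain ⟨ihlen, ihrows, ihcells⟩ :=
      ih (fun q hq => hL q (List.mem_cons_of_mem _ hq)) _ hm' hrows''
    refine ⟨ihlen, ihrows, ?_⟩
    intro i j hi hj
    rw [List.foldl_cons, ihcells i j hi hj]
    rw [hcells1 i j (by rw [hm]; exact hi) (by rw [hm]; exact hj), hm]
    have hpairiff : (((j : Int), bm.getD j []) = ((k : Int), bm.getD k [])) ↔ j = k := by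
      constructor
      · intro h
        have := congrArg Prod.fst h
        simpa using this
      · rintro rfl; rfl
    by_cases hjk : j = k
    · subst hjk
      simp only [List.mem_cons, hpairiff, true_or, true_and]
      split_ifs <;> first | rfl | (exact pvOptMin_idem _ _) | tauto
    · simp only [List.mem_cons, hpairiff, hjk, false_or]
      split_ifs <;> first | rfl | (exact pvOptMin_idem _ _) | tauto

lemma pvInnerB_cell (d : PySem.Dict Int Int) (c : Int) (cols : List Int) (bm : List (List Int))
    (L : List (Int × List Int))
    (hL : ∀ q ∈ L, ∃ k : Nat, k < bm.length ∧ q = ((k : Int), bm.getD k [])) :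
    ∀ m : List (List (Option Int)), m.length = bm.length → (∀ r ∈ m, r.length = bm.length) →
    (L.foldl (pvStepB d c cols) m).length = bm.length ∧
    (∀ r ∈ L.foldl (pvStepB d c cols) m, r.length = bm.length) ∧
    (∀ i j : Nat, i < bm.length → j < bm.length →
      pvCell (L.foldl (pvStepB d c cols) m) i j =
        if ((j : Int), bm.getD j []) ∈ L ∧ PySem.List.pyIdx? bm.length c = some i ∧
            (pvValsB d (bm.getD j []) cols).isEmpty = false
        then PySem.List.min? (pvValsB d (bm.getD j []) cols) (fun x => x)
        else pvCell m i j) := by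
  induction L with
  | nil =>
    intro m hm hrows
    refine ⟨hm, hrows, ?_⟩
    intro i j hi hj
    simp
  | cons q L ih =>
    intro m hm hrows
    obtain ⟨k, hk, rfl⟩ := hL q (List.mem_cons_self)
    have hrows' : ∀ r ∈ m, r.length = m.length := fun r hr => by rw [hm]; exact hrows r hr
    have hk' : k < m.length := by rw [hm]; exact hk
    obtain ⟨hlen1, hrows1, hcells1⟩ := pvStepB_cell d c cols m k (bm.getD k []) hrows' hk'
    have hm' : (pvStepB d c cols m ((k : Int), bm.getD k [])).length = bm.length := by
      rw [hlen1, hm]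
    have hrows'' : ∀ r ∈ pvStepB d c cols m ((k : Int), bm.getD k []), r.length = bm.length := by
      intro r hr
      rw [← hm]
      exact hrows1 r hr
    obtain ⟨ihlen, ihrows, ihcells⟩ :=
      ih (fun q hq => hL q (List.mem_cons_of_mem _ hq)) _ hm' hrows''
    refine ⟨ihlen, ihrows, ?_⟩
    intro i j hi hj
    rw [List.foldl_cons, ihcells i j hi hj]
    rw [hcells1 i j (by rw [hm]; exact hi) (by rw [hm]; exact hj), hm]
    have hpairiff : (((j : Int), bm.getD j []) = ((k : Int), bm.getD k [])) ↔ j = k := by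
      constructor
      · intro h
        have := congrArg Prod.fst h
        simpa using this
      · rintro rfl; rfl
    by_cases hjk : j = k
    · subst hjk
      simp only [List.mem_cons, hpairiff, true_or, true_and]
      split_ifs <;> first | rfl | tauto
    · simp only [List.mem_cons, hpairiff, hjk, false_or]
      split_ifs <;> first | rfl | tauto

lemma pvEnum_mem (bm : List (List Int)) :
    ∀ q ∈ PySem.List.enumerate bm 0, ∃ k : Nat, k < bm.length ∧ q = ((k : Int), bm.getD k []) := by
  intro q hq
  rw [PySem.List.mem_enumerate_iff] at hq
  obtain ⟨k, hk, rfl⟩ := hq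
  exact ⟨k, hk, by simp [List.getD_eq_getElem?_getD, List.getElem?_eq_getElem hk]⟩

lemma pvA_cell (d : PySem.Dict Int Int) (bm : List (List Int)) (balls : List (Int × Int)) :
    ∀ m : List (List (Option Int)), m.length = bm.length → (∀ r ∈ m, r.length = bm.length) →
    (balls.foldl (fun m p => (PySem.List.enumerate bm 0).foldl (pvStepA d p.1 p.2) m) m).length = bm.length ∧
    (∀ r ∈ balls.foldl (fun m p => (PySem.List.enumerate bm 0).foldl (pvStepA d p.1 p.2) m) m, r.length = bm.length) ∧
    (∀ i j : Nat, i < bm.length → j < bm.length →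
      pvCell (balls.foldl (fun m p => (PySem.List.enumerate bm 0).foldl (pvStepA d p.1 p.2) m) m) i j =
        (pvSeq d bm.length bm i j balls).foldl pvOptMin (pvCell m i j)) := by
  induction balls with
  | nil =>
    intro m hm hrows
    refine ⟨hm, hrows, ?_⟩
    intro i j hi hj
    simp [pvSeq]
  | cons p balls ih =>
    intro m hm hrows
    obtain ⟨hlen1, hrows1, hcells1⟩ := pvInner_cell d p.1 p.2 bm (PySem.List.enumerate bm 0) (pvEnum_mem bm) m hm hrows
    obtain ⟨ihlen, ihrows, ihcells⟩ := ih _ hlen1 hrows1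
    refine ⟨ihlen, ihrows, ?_⟩
    intro i j hi hj
    rw [List.foldl_cons, ihcells i j hi hj, hcells1 i j hi hj]
    have hmem : ((j : Int), bm.getD j []) ∈ PySem.List.enumerate bm 0 := by
      rw [PySem.List.mem_enumerate_iff]
      exact ⟨j, hj, by simp [List.getD_eq_getElem?_getD, List.getElem?_eq_getElem hj]⟩
    unfold pvSeq
    by_cases hc : pvCond d bm.length bm i j p = true
    · rw [List.filter_cons_of_pos hc, List.map_cons, List.foldl_cons]
      have : (((j : Int), bm.getD j []) ∈ PySem.List.enumerate bm 0 ∧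
          PySem.List.pyIdx? bm.length p.1 = some i ∧
          pvTr (bm.getD j []) p.2 = true ∧ (d.get? p.2).isSome = true) := by
        unfold pvCond at hc
        simp only [Bool.and_eq_true, beq_iff_eq] at hc
        exact ⟨hmem, hc.1.1, hc.1.2, hc.2⟩
      rw [if_pos this]
    · rw [List.filter_cons_of_neg (by simpa using hc)]
      have : ¬(((j : Int), bm.getD j []) ∈ PySem.List.enumerate bm 0 ∧
          PySem.List.pyIdx? bm.length p.1 = some i ∧
          pvTr (bm.getD j []) p.2 = true ∧ (d.get? p.2).isSome = true) := by
        intro h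
        apply hc
        unfold pvCond
        simp only [Bool.and_eq_true, beq_iff_eq]
        exact ⟨⟨h.2.1, h.2.2.1⟩, h.2.2.2⟩
      rw [if_neg this]

lemma pvB_cell (d : PySem.Dict Int Int) (bm : List (List Int)) (L : List (Int × List Int)) :
    ∀ m : List (List (Option Int)), m.length = bm.length → (∀ r ∈ m, r.length = bm.length) →
    (L.foldl (fun m pc => (PySem.List.enumerate bm 0).foldl (pvStepB d pc.1 pc.2) m) m).length = bm.length ∧
    (∀ r ∈ L.foldl (fun m pc => (PySem.List.enumerate bm 0).foldl (pvStepB d pc.1 pc.2) m) m, r.length = bm.length) ∧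
    (∀ i j : Nat, i < bm.length → j < bm.length →
      pvCell (L.foldl (fun m pc => (PySem.List.enumerate bm 0).foldl (pvStepB d pc.1 pc.2) m) m) i j =
        (L.filter (pvCondB d bm.length bm i j)).foldl
          (fun _ pc => PySem.List.min? (pvValsB d (bm.getD j []) pc.2) (fun x => x)) (pvCell m i j)) := by
  induction L with
  | nil =>
    intro m hm hrows
    refine ⟨hm, hrows, ?_⟩
    intro i j hi hj
    simp
  | cons pc L ih =>
    intro m hm hrows
    obtain ⟨hlen1, hrows1, hcells1⟩ := pvInnerB_cell d pc.1 pc.2 bm (PySem.List.enumerate bm 0) (pvEnum_mem bm) m hm hrows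
    obtain ⟨ihlen, ihrows, ihcells⟩ := ih _ hlen1 hrows1
    refine ⟨ihlen, ihrows, ?_⟩
    intro i j hi hj
    rw [List.foldl_cons, ihcells i j hi hj, hcells1 i j hi hj]
    have hmem : ((j : Int), bm.getD j []) ∈ PySem.List.enumerate bm 0 := by
      rw [PySem.List.mem_enumerate_iff]
      exact ⟨j, hj, by simp [List.getD_eq_getElem?_getD, List.getElem?_eq_getElem hj]⟩
    by_cases hc : pvCondB d bm.length bm i j pc = true
    · rw [List.filter_cons_of_pos hc, List.foldl_cons]
      have : (((j : Int), bm.getD j []) ∈ PySem.List.enumerate bm 0 ∧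
          PySem.List.pyIdx? bm.length pc.1 = some i ∧
          (pvValsB d (bm.getD j []) pc.2).isEmpty = false) := by
        unfold pvCondB at hc
        simp only [Bool.and_eq_true, beq_iff_eq, Bool.not_eq_true'] at hc
        exact ⟨hmem, hc.1, hc.2⟩
      rw [if_pos this]
    · rw [List.filter_cons_of_neg (by simpa using hc)]
      have : ¬(((j : Int), bm.getD j []) ∈ PySem.List.enumerate bm 0 ∧
          PySem.List.pyIdx? bm.length pc.1 = some i ∧
          (pvValsB d (bm.getD j []) pc.2).isEmpty = false) := by
        intro h
        apply hc
        unfold pvCondB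
        simp only [Bool.and_eq_true, beq_iff_eq, Bool.not_eq_true']
        exact ⟨h.2.1, h.2.2⟩
      rw [if_neg this]

lemma pvFold_optMin_eq_min? (l : List Int) :
    l.foldl pvOptMin none = PySem.List.min? l (fun x => x) := by
  unfold PySem.List.min?
  apply PySem.List.foldl_congr_mem
  intro acc x _
  cases acc <;> simp [pvOptMin]

lemma pvValsB_eq (d : PySem.Dict Int Int) (line : List Int) (cols : List Int) :
    pvValsB d line cols =
      (cols.filter (fun c => pvTr line c && (d.get? c).isSome)).map (pvW d) := by
  unfold pvValsB
  rw [show (fun (acc : List Int) c =>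
      match PySem.List.pyGet? line c with
      | none => acc
      | some v => if v ≠ 0 then (match d.get? c with | none => acc | some w => acc ++ [w]) else acc)
    = (fun acc c => if (pvTr line c && (d.get? c).isSome) then acc ++ [pvW d c] else acc) from ?_]
  · rw [PySem.List.foldl_append_if]
    simp
  · funext acc c
    unfold pvTr pvW
    cases h : PySem.List.pyGet? line c <;> simp
    split_ifs <;> cases hd : d.get? c <;> simp_all

lemma pvValsB_ne_empty_iff (d : PySem.Dict Int Int) (line : List Int) (cols : List Int) :
    (pvValsB d line cols).isEmpty = false ↔
      ∃ c ∈ cols, pvTr line c = true ∧ (d.get? c).isSome = true := by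
  rw [pvValsB_eq]
  simp [List.isEmpty_eq_false_iff, List.filter_eq_nil_iff, Option.isSome_iff_ne_none]

lemma pvGetD_ne_zero_of_tr {line : List Int} {c : Int} (h : pvTr line c = true) :
    PySem.List.pyGetD line c 0 ≠ 0 := by
  unfold pvTr at h
  unfold PySem.List.pyGetD
  cases hg : PySem.List.pyGet? line c <;> simp_all

lemma pvNodupKeyEq {α β : Type} (L : List (α × β)) (h : (L.map Prod.fst).Nodup)
    {a b : α × β} (ha : a ∈ L) (hb : b ∈ L) (hfst : a.1 = b.1) : a = b := by
  induction L with
  | nil => cases ha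
  | cons x L ih =>
    rw [List.map_cons, List.nodup_cons] at h
    rcases List.mem_cons.1 ha with rfl | ha' <;> rcases List.mem_cons.1 hb with rfl | hb'
    · rfl
    · exact absurd (hfst ▸ List.mem_map_of_mem hb') h.1
    · exact absurd (hfst ▸ List.mem_map_of_mem ha') h.1
    · exact ih h.2 ha' hb'

lemma pvFoldl_last {α β : Type} (l : List α) (g : α → β) (v : β)
    (h : ∀ x ∈ l, g x = v) (hne : l ≠ []) :
    ∀ a : β, l.foldl (fun _ x => g x) a = v := by
  induction l with
  | nil => exact absurd rfl hne
  | cons x l ih =>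
    intro a
    rw [List.foldl_cons]
    cases l with
    | nil => simpa using h x List.mem_cons_self
    | cons y l => exact ih (fun z hz => h z (List.mem_cons_of_mem _ hz)) (by simp) _

-- the per-cell equivalence: A's incremental minimum over touching balls equals B's last (unique)
-- contributing group's one-shot minimum
lemma pvCell_equiv (ci : List (Int × Int)) (bm : List (List Int)) (balls : List (Int × Int))
    (hAlias : ∀ p ∈ balls, ∀ q ∈ balls, p.1 - q.1 = (bm.length : Int) →
      ∀ line ∈ bm, ¬(PySem.List.pyGetD line p.2 0 ≠ 0 ∧ PySem.List.pyGetD line q.2 0 ≠ 0))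
    (i j : Nat) (hi : i < bm.length) (hj : j < bm.length) :
    (pvSeq (PySem.Dict.mk ci) bm.length bm i j balls).foldl pvOptMin none =
    ((balls.foldl (fun g p => g.modify p.1 [] (· ++ [p.2]))
        (PySem.Dict.empty : PySem.Dict Int (List Int))).items.filter
          (pvCondB (PySem.Dict.mk ci) bm.length bm i j)).foldl
      (fun _ pc => PySem.List.min? (pvValsB (PySem.Dict.mk ci) (bm.getD j []) pc.2) (fun x => x))
      none := by
  have hlinemem : bm.getD j [] ∈ bm := by
    rw [List.getD_eq_getElem?_getD, List.getElem?_eq_getElem hj]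
    exact List.getElem_mem hj
  have hnodup : ((balls.foldl (fun g p => g.modify p.1 [] (· ++ [p.2]))
      (PySem.Dict.empty : PySem.Dict Int (List Int))).keys).Nodup := by
    exact PySem.Dict.nodup_keys_foldl_modify_key balls (fun p => p.1) []
      (fun _ p => (· ++ [p.2])) PySem.Dict.empty (by simp)
  have hcols : ∀ pc ∈ (balls.foldl (fun g p => g.modify p.1 [] (· ++ [p.2]))
      (PySem.Dict.empty : PySem.Dict Int (List Int))).items,
      pc.2 = (balls.filter (fun q => q.1 == pc.1)).map (fun q => q.2) := by
    intro pc hpc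
    have h1 : (balls.foldl (fun g p => g.modify p.1 [] (· ++ [p.2]))
        (PySem.Dict.empty : PySem.Dict Int (List Int))).getD pc.1 [] = pc.2 :=
      PySem.Dict.getD_of_mem_items _ hpc hnodup []
    rw [PySem.Dict.getD_foldl_modify_append] at h1
    simpa using h1.symm
  have hkeyitem : ∀ p ∈ balls, ∃ pc ∈ (balls.foldl (fun g p => g.modify p.1 [] (· ++ [p.2]))
      (PySem.Dict.empty : PySem.Dict Int (List Int))).items, pc.1 = p.1 := by
    intro p hp
    have hk : p.1 ∈ (balls.foldl (fun g p => g.modify p.1 [] (· ++ [p.2]))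
        (PySem.Dict.empty : PySem.Dict Int (List Int))).keys := by
      rw [PySem.Dict.keys_foldl_modify_key balls (fun p => p.1) [] (fun _ p => (· ++ [p.2]))
        PySem.Dict.empty]
      simp [PySem.Set.mem_update, PySem.Dict.keys_empty]
      exact ⟨p.2, hp⟩
    simp only [PySem.Dict.keys, List.mem_map] at hk
    obtain ⟨pc, hpc, hpc1⟩ := hk
    exact ⟨pc, hpc, hpc1⟩
  -- a ball touching the cell yields a contributing group with the same center
  have hcontrib : ∀ p ∈ balls, pvCond (PySem.Dict.mk ci) bm.length bm i j p = true →
      ∃ pc ∈ (balls.foldl (fun g p => g.modify p.1 [] (· ++ [p.2]))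
        (PySem.Dict.empty : PySem.Dict Int (List Int))).items,
        pc.1 = p.1 ∧ pvCondB (PySem.Dict.mk ci) bm.length bm i j pc = true := by
    intro p hp hc
    unfold pvCond at hc
    simp only [Bool.and_eq_true, beq_iff_eq] at hc
    obtain ⟨pc, hpc, hpc1⟩ := hkeyitem p hp
    refine ⟨pc, hpc, hpc1, ?_⟩
    unfold pvCondB
    simp only [Bool.and_eq_true, beq_iff_eq, Bool.not_eq_true']
    refine ⟨hpc1 ▸ hc.1.1, ?_⟩
    rw [pvValsB_ne_empty_iff]
    refine ⟨p.2, ?_, hc.1.2, hc.2⟩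
    rw [hcols pc hpc]
    exact List.mem_map_of_mem (List.mem_filter.2 ⟨hp, by simp [hpc1]⟩)
  -- a contributing group yields a ball with that center, truthy in this line
  have hballof : ∀ pc ∈ (balls.foldl (fun g p => g.modify p.1 [] (· ++ [p.2]))
      (PySem.Dict.empty : PySem.Dict Int (List Int))).items,
      pvCondB (PySem.Dict.mk ci) bm.length bm i j pc = true →
      ∃ p ∈ balls, p.1 = pc.1 ∧ pvTr (bm.getD j []) p.2 = true := by
    intro pc hpc hc
    unfold pvCondB at hc
    simp only [Bool.and_eq_true, Bool.not_eq_true'] at hc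
    obtain ⟨c, hcmem, htr, _⟩ := (pvValsB_ne_empty_iff _ _ _).1 hc.2
    rw [hcols pc hpc] at hcmem
    obtain ⟨q, hq, rfl⟩ := List.mem_map.1 hcmem
    have := (List.mem_filter.1 hq).2
    exact ⟨q, (List.mem_filter.1 hq).1, by simpa using this, htr⟩
  -- at most one group contributes to the cell (Pre_'s second conjunct)
  have huniq : ∀ pc ∈ (balls.foldl (fun g p => g.modify p.1 [] (· ++ [p.2]))
      (PySem.Dict.empty : PySem.Dict Int (List Int))).items,
      ∀ pc' ∈ (balls.foldl (fun g p => g.modify p.1 [] (· ++ [p.2]))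
      (PySem.Dict.empty : PySem.Dict Int (List Int))).items,
      pvCondB (PySem.Dict.mk ci) bm.length bm i j pc = true →
      pvCondB (PySem.Dict.mk ci) bm.length bm i j pc' = true → pc = pc' := by
    intro pc hpc pc' hpc' hc hc'
    by_cases hfst : pc.1 = pc'.1
    · exact pvNodupKeyEq _ hnodup hpc hpc' hfst
    · exfalso
      have hidx : PySem.List.pyIdx? bm.length pc.1 = some i := by
        unfold pvCondB at hc; simp only [Bool.and_eq_true, beq_iff_eq] at hc; exact hc.1
      have hidx' : PySem.List.pyIdx? bm.length pc'.1 = some i := by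
        unfold pvCondB at hc'; simp only [Bool.and_eq_true, beq_iff_eq] at hc'; exact hc'.1
      obtain ⟨p, hp, hp1, hptr⟩ := hballof pc hpc hc
      obtain ⟨q, hq, hq1, hqtr⟩ := hballof pc' hpc' hc'
      rcases pvIdx?_alias hidx hidx' with h | h | h
      · exact hfst h
      · exact hAlias p hp q hq (by omega) _ hlinemem
          ⟨pvGetD_ne_zero_of_tr hptr, pvGetD_ne_zero_of_tr hqtr⟩
      · exact hAlias q hq p hp (by omega) _ hlinemem
          ⟨pvGetD_ne_zero_of_tr hqtr, pvGetD_ne_zero_of_tr hptr⟩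
  cases hF : (balls.foldl (fun g p => g.modify p.1 [] (· ++ [p.2]))
      (PySem.Dict.empty : PySem.Dict Int (List Int))).items.filter
        (pvCondB (PySem.Dict.mk ci) bm.length bm i j) with
  | nil =>
    have hseq : pvSeq (PySem.Dict.mk ci) bm.length bm i j balls = [] := by
      unfold pvSeq
      rw [List.filter_eq_nil_iff.2, List.map_nil]
      intro p hp hc
      obtain ⟨pc, hpc, _, hcB⟩ := hcontrib p hp hc
      have : pc ∈ (balls.foldl (fun g p => g.modify p.1 [] (· ++ [p.2]))
          (PySem.Dict.empty : PySem.Dict Int (List Int))).items.filter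
            (pvCondB (PySem.Dict.mk ci) bm.length bm i j) := List.mem_filter.2 ⟨hpc, hcB⟩
      rw [hF] at this
      cases this
    rw [hseq]
    rfl
  | cons pc rest =>
    have hpcF : pc ∈ (balls.foldl (fun g p => g.modify p.1 [] (· ++ [p.2]))
        (PySem.Dict.empty : PySem.Dict Int (List Int))).items.filter
          (pvCondB (PySem.Dict.mk ci) bm.length bm i j) :=
      hF.symm ▸ (List.mem_cons_self)
    have hpcitems := (List.mem_filter.1 hpcF).1
    have hpcc := (List.mem_filter.1 hpcF).2
    have hpcidx : PySem.List.pyIdx? bm.length pc.1 = some i := by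
      unfold pvCondB at hpcc; simp only [Bool.and_eq_true, beq_iff_eq] at hpcc; exact hpcc.1
    -- B's side: every filtered group IS pc, so the overwrite fold returns pc's minimum
    have hBside : (pc :: rest).foldl
        (fun _ pc => PySem.List.min? (pvValsB (PySem.Dict.mk ci) (bm.getD j []) pc.2) (fun x => x))
        none = PySem.List.min? (pvValsB (PySem.Dict.mk ci) (bm.getD j []) pc.2) (fun x => x) := by
      apply pvFoldl_last
      · intro x hx
        have hxF := List.mem_filter.1 (hF.symm ▸ hx)
        rw [huniq _ hxF.1 _ hpcitems hxF.2 hpcc]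
      · simp
    rw [hBside]
    -- A's side: exactly the balls of pc's group touch the cell
    have hpred : ∀ p ∈ balls, pvCond (PySem.Dict.mk ci) bm.length bm i j p =
        ((p.1 == pc.1) && (pvTr (bm.getD j []) p.2 && ((PySem.Dict.mk ci).get? p.2).isSome)) := by
      intro p hp
      cases hc : pvCond (PySem.Dict.mk ci) bm.length bm i j p with
      | true =>
        obtain ⟨pc', hpc', hpc'1, hcB'⟩ := hcontrib p hp hc
        have hthis : pc' = pc := huniq _ hpc' _ hpcitems hcB' hpcc
        unfold pvCond at hc
        simp only [Bool.and_eq_true, beq_iff_eq] at hc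
        have h1 : (p.1 == pc.1) = true := by simp [← hthis, hpc'1]
        rw [h1, hc.1.2, hc.2]
        rfl
      | false =>
        unfold pvCond at hc
        rw [Bool.and_assoc] at hc
        simp only [Bool.and_eq_false_iff] at hc
        rcases hc with hc | hc
        · -- pyIdx? p.1 ≠ some i, so p.1 ≠ pc.1
          symm
          simp only [Bool.and_eq_false_iff, beq_eq_false_iff_ne, ne_eq]
          left
          intro hpp
          rw [hpp, hpcidx] at hc
          simp at hc
        · symm
          simp only [Bool.and_eq_false_iff]
          right
          exact hc
    have hseq : pvSeq (PySem.Dict.mk ci) bm.length bm i j balls =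
        pvValsB (PySem.Dict.mk ci) (bm.getD j []) pc.2 := by
      unfold pvSeq
      rw [List.filter_congr hpred, pvValsB_eq, hcols pc hpcitems]
      simp only [List.filter_map, List.map_map, List.filter_filter, Function.comp_def]
      congr 1
      apply List.filter_congr
      intro a _
      cases h1 : (a.1 == pc.1) <;> cases h2 : pvTr (bm.getD j []) a.2 <;> simp [h1, h2]
    rw [hseq, pvFold_optMin_eq_min?]

lemma pvCell_eq_getElem (m : List (List (Option Int))) (i j : Nat)
    (hi : i < m.length) (hj : j < m[i].length) : m[i][j] = pvCell m i j := by
  unfold pvCell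
  rw [List.getD_eq_getElem?_getD (l := m) (i := i), List.getElem?_eq_getElem hi, Option.getD_some,
    List.getD_eq_getElem?_getD, List.getElem?_eq_getElem hj, Option.getD_some]

-- ===== VERDICT (by name: the statement is the Claim_ definition above) =====
theorem cluster_matrix_from_column_indices_spec : Claim_equal_cluster_matrix_from_column_indices := by
  intro balls ci bm _ hpre
  obtain ⟨_, hAlias⟩ := hpre
  unfold Spec_cluster_matrix_from_column_indices
  have hA : cluster_matrix_from_column_indices balls ci bm
      = balls.foldl (fun m p => (PySem.List.enumerate bm 0).foldl
          (pvStepA (PySem.Dict.mk ci) p.1 p.2) m)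
          (List.replicate bm.length (List.replicate bm.length (none : Option Int))) := rfl
  have hB : cluster_matrix_from_column_indices_alt balls ci bm
      = (balls.foldl (fun g p => g.modify p.1 [] (· ++ [p.2]))
          (PySem.Dict.empty : PySem.Dict Int (List Int))).items.foldl
          (fun m pc => (PySem.List.enumerate bm 0).foldl (pvStepB (PySem.Dict.mk ci) pc.1 pc.2) m)
          (List.replicate bm.length (List.replicate bm.length (none : Option Int))) := rfl
  rw [hA, hB]
  have hinitlen : (List.replicate bm.length (List.replicate bm.length (none : Option Int))).length = bm.length := by simp
  have hinitrows : ∀ r ∈ List.replicate bm.length (List.replicate bm.length (none : Option Int)), r.length = bm.length := by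
    intro r hr; rw [List.eq_of_mem_replicate hr]; simp
  obtain ⟨hAlen, hArows, hAcells⟩ := pvA_cell (PySem.Dict.mk ci) bm balls _ hinitlen hinitrows
  obtain ⟨hBlen, hBrows, hBcells⟩ := pvB_cell (PySem.Dict.mk ci) bm
    ((balls.foldl (fun g p => g.modify p.1 [] (· ++ [p.2]))
      (PySem.Dict.empty : PySem.Dict Int (List Int))).items) _ hinitlen hinitrows
  apply List.ext_getElem (by rw [hAlen, hBlen])
  intro i hi hi'
  have hibm : i < bm.length := by rw [hAlen] at hi; exact hi
  have hrowA : _ = bm.length := hArows _ (List.getElem_mem hi)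
  have hrowB : _ = bm.length := hBrows _ (List.getElem_mem hi')
  apply List.ext_getElem (by rw [hrowA, hrowB])
  intro j hj hj'
  have hjbm : j < bm.length := by rw [hrowA] at hj; exact hj
  rw [pvCell_eq_getElem _ i j hi hj, pvCell_eq_getElem _ i j hi' hj',
    hAcells i j hibm hjbm, hBcells i j hibm hjbm]
  have hinit : pvCell (List.replicate bm.length (List.replicate bm.length (none : Option Int))) i j = none := by
    unfold pvCell
    simp [List.getD_eq_getElem?_getD, hibm, hjbm]
  rw [hinit]
  exact pvCell_equiv ci bm balls hAlias i j hibm hjbm
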